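-- pv_equiv track=rewrite | github.com/lulavalenca/ExerciciosProz | Exercicios_Avulsos/Exercicio_lista2_1.py | encontrar_maior_menor_par_impar
-- ===== SOURCE A (Python) =====
-- def encontrar_maior_menor_par_impar(lista):
--     if not lista:
--         return None, None, None, None  # Retorna None se a lista estiver vazia
--
--     maior = menor = lista[0]  # Inicializa 'maior' e 'menor' com o primeiro elemento da lista
--     par = impar = 0  # Inicializa contadores para números pares e ímpares
--
--     for numero in lista:
--         if numero > maior:
--             maior = numero
--         elif numero < menor:
--             menor = numero
--
--         if numero % 2 == 0:
--             par += 1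
--         else:
--             impar += 1
--
--     return maior, menor, par, impar
-- ===== SOURCE B (Python) =====
-- def encontrar_maior_menor_par_impar(lista):
--     if not lista:
--         return None, None, None, None
--     par = sum(1 for x in lista if x % 2 == 0)
--     return max(lista), min(lista), par, len(lista) - par
-- ===== Notes on version B (the rewrite author's own statement) =====
-- stated objective: idiomatic
-- what changed: Replaces the single fused manual loop tracking four accumulators by built-in passes: max(lista), min(lista), a comprehension counting evens, and len-par for odds.
import Mathlib
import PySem

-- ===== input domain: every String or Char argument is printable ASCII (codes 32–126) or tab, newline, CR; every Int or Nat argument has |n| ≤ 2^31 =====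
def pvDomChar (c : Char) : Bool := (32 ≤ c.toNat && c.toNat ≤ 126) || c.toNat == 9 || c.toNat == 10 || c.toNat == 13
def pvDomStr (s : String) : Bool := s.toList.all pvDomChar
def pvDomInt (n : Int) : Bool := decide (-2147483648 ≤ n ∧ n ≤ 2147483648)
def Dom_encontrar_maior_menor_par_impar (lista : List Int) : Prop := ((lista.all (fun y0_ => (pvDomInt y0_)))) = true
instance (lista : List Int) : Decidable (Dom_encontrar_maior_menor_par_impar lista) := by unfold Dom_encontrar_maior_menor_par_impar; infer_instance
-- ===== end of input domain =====

-- B replaces A's single fused manual loop by idiomatic built-in passes (max, min, a count of evens, len - evens).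

-- ===== PORT A =====
-- loop body of A: update (maior, menor) with the if/elif, then the parity counters
def pvStepA (st : Int × Int × Int × Int) (numero : Int) : Int × Int × Int × Int :=
  match st with
  | (maior, menor, par, impar) =>
    let mm : Int × Int :=
      if numero > maior then (numero, menor)
      else if numero < menor then (maior, numero)
      else (maior, menor)
    if PySem.Int.mod numero 2 == 0 then (mm.1, mm.2, par + 1, impar)
    else (mm.1, mm.2, par, impar + 1)

def encontrar_maior_menor_par_impar (lista : List Int) : Option Int × Option Int × Option Int × Option Int :=
  match lista with
  | [] => (none, none, none, none)
  | h :: _ =>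
    match lista.foldl pvStepA (h, h, 0, 0) with
    | (maior, menor, par, impar) => (some maior, some menor, some par, some impar)

-- ===== PORT B =====
def encontrar_maior_menor_par_impar_alt (lista : List Int) : Option Int × Option Int × Option Int × Option Int :=
  match lista with
  | [] => (none, none, none, none)
  | _ :: _ =>
    let par : Int := ((lista.filter (fun x => PySem.Int.mod x 2 == 0)).length : Int)
    (PySem.List.max? lista (fun y => y), PySem.List.min? lista (fun y => y),
     some par, some ((lista.length : Int) - par))

-- ===== PRECONDITION & SPEC =====
def Spec_encontrar_maior_menor_par_impar (lista : List Int) (out : Option Int × Option Int × Option Int × Option Int) : Prop := out = encontrar_maior_menor_par_impar_alt lista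
instance (lista : List Int) (out : Option Int × Option Int × Option Int × Option Int) : Decidable (Spec_encontrar_maior_menor_par_impar lista out) := by unfold Spec_encontrar_maior_menor_par_impar; infer_instance

-- ===== CLAIM (what is proved, stated in full; the proofs are below) =====
def Claim_equal_encontrar_maior_menor_par_impar : Prop := ∀ (lista : List Int), Dom_encontrar_maior_menor_par_impar lista → Spec_encontrar_maior_menor_par_impar lista (encontrar_maior_menor_par_impar lista)

-- ===== LEMMAS AND PROOFS =====

-- invariant of A's loop: given menor ≤ maior, the fold computes running max/min and the parity counts
lemma pvLoopA (l : List Int) (m n p i : Int) (hnm : n ≤ m) :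
    l.foldl pvStepA (m, n, p, i) =
      (l.foldl max m, l.foldl min n,
       p + ((l.filter (fun x => PySem.Int.mod x 2 == 0)).length : Int),
       i + ((l.length : Int) - ((l.filter (fun x => PySem.Int.mod x 2 == 0)).length : Int))) := by
  induction l generalizing m n p i with
  | nil => simp
  | cons a t ih =>
    have hle := List.length_filter_le (fun x => PySem.Int.mod x 2 == 0) t
    have hstep : pvStepA (m, n, p, i) a =
        (if PySem.Int.mod a 2 == 0 then (max m a, min n a, p + 1, i)
         else (max m a, min n a, p, i + 1)) := by
      simp only [pvStepA]
      split_ifs <;> simp [Prod.ext_iff] <;> omega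
    simp only [List.foldl_cons, List.filter_cons, List.length_cons, hstep]
    have hnm' : min n a ≤ max m a := by omega
    cases h3 : (PySem.Int.mod a 2 == 0) with
    | true =>
      rw [if_pos rfl, ih _ _ _ _ hnm']
      simp [Prod.ext_iff]
      omega
    | false =>
      rw [if_neg (by simp), ih _ _ _ _ hnm']
      simp [Prod.ext_iff]
      omega

-- ===== VERDICT (by name: the statement is the Claim_ definition above) =====
theorem encontrar_maior_menor_par_impar_spec : Claim_equal_encontrar_maior_menor_par_impar := by
  intro lista _
  unfold Spec_encontrar_maior_menor_par_impar
  cases lista with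
  | nil => rfl
  | cons h t =>
    simp only [encontrar_maior_menor_par_impar, encontrar_maior_menor_par_impar_alt,
      PySem.List.max?_id_cons, PySem.List.min?_id_cons]
    rw [pvLoopA _ _ _ _ _ (le_refl h)]
    simp [List.foldl_cons]
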